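-- pv_equiv track=rewrite | github.com/ellen978/Leetcode2 | 360. Sort Transformed Array.py | sortTransformedArray
-- ===== SOURCE A (Python) =====
-- def sortTransformedArray(nums, a, b, c):
--     """
--     :type nums: List[int]
--     :type a: int
--     :type b: int
--     :type c: int
--     :rtype: List[int]
--     """
--     result=[a*nums[0]**2+b*nums[0]+c]
--     pos=0
--     i=1
--     while i<len(nums):
--         r=a*nums[i]*nums[i]+b*nums[i]+c
--         while pos>0 and r<result[pos]:
--             pos-=1
--         while pos<i and r>result[pos]:
--             pos+=1
--         result.insert(pos,r)
--         i+=1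
--     return result
-- ===== SOURCE B (Python) =====
-- def sortTransformedArray(nums, a, b, c):
--     return sorted(a * x * x + b * x + c for x in nums)
-- ===== Notes on version B (the rewrite author's own statement) =====
-- stated objective: faster
-- what changed: A builds the result by an O(n^2) moving-pointer insertion with repeated list.insert; B maps the quadratic over the list once and uses the library sort.
import Mathlib
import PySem

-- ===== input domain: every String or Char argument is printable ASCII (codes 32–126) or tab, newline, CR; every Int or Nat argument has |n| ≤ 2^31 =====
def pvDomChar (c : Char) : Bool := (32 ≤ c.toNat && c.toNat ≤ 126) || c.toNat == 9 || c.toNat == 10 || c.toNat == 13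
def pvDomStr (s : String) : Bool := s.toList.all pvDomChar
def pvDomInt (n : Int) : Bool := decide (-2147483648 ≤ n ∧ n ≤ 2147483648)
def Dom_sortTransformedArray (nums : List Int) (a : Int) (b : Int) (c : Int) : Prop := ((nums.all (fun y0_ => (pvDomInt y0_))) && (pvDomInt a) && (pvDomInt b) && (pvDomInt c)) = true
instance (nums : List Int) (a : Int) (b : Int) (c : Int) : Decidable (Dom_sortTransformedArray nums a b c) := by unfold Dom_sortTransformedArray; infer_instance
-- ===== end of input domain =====

-- B replaces A's quadratic moving-pointer insertion loop by map + library sort; faster (asymptotic).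

-- ===== PORT A =====
-- 'while pos>0 and r<result[pos]: pos-=1'  (result[pos] read via getD: the loop keeps pos in range, see pvMain_spec below)
def pvDown (result : List Int) (r : Int) : Nat → Nat
  | 0 => 0
  | pos + 1 => if r < result.getD (pos + 1) 0 then pvDown result r pos else pos + 1

-- 'while pos<i and r>result[pos]: pos+=1'
def pvUp (result : List Int) (r : Int) (i : Nat) (pos : Nat) : Nat :=
  if pos < i ∧ r > result.getD pos 0 then pvUp result r i (pos + 1) else pos
termination_by i - pos
decreasing_by omega

-- the outer 'while i<len(nums)' loop, iterating over the not-yet-processed suffix of nums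
def pvMain (a b c : Int) : List Int → List Int → Nat → Nat → List Int
  | [], result, _, _ => result
  | x :: xs, result, pos, i =>
    let r := a * x * x + b * x + c
    let pos1 := pvDown result r pos
    let pos2 := pvUp result r i pos1
    pvMain a b c xs (PySem.List.insert result (pos2 : Int) r) pos2 (i + 1)

def sortTransformedArray (nums : List Int) (a : Int) (b : Int) (c : Int) : List Int :=
  match nums with
  | [] => []  -- Python raises IndexError on nums[0]; excluded by Pre_
  | x :: xs => pvMain a b c xs [a * x ^ 2 + b * x + c] 0 1

-- ===== PORT B =====
def sortTransformedArray_alt (nums : List Int) (a : Int) (b : Int) (c : Int) : List Int :=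
  PySem.List.sorted (nums.map (fun x => a * x * x + b * x + c)) (fun v => v) false

-- ===== PRECONDITION & SPEC =====
-- A reads nums[0] unconditionally, so it raises IndexError on the empty list; Pre_ excludes exactly that.
def Pre_sortTransformedArray (nums : List Int) (a : Int) (b : Int) (c : Int) : Prop := nums ≠ []
instance (nums : List Int) (a : Int) (b : Int) (c : Int) : Decidable (Pre_sortTransformedArray nums a b c) := by unfold Pre_sortTransformedArray; infer_instance
def pvWitness_sortTransformedArray : List Int × Int × Int × Int := ([-2, 1, 3], 1, -1, 2)

def Spec_sortTransformedArray (nums : List Int) (a : Int) (b : Int) (c : Int) (out : List Int) : Prop := out = sortTransformedArray_alt nums a b c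
instance (nums : List Int) (a : Int) (b : Int) (c : Int) (out : List Int) : Decidable (Spec_sortTransformedArray nums a b c out) := by unfold Spec_sortTransformedArray; infer_instance

-- ===== CLAIM (what is proved, stated in full; the proofs are below) =====
def Claim_equal_sortTransformedArray : Prop := ∀ (nums : List Int) (a : Int) (b : Int) (c : Int), Dom_sortTransformedArray nums a b c → Pre_sortTransformedArray nums a b c → Spec_sortTransformedArray nums a b c (sortTransformedArray nums a b c)

-- ===== LEMMAS AND PROOFS =====

-- the downward scan never increases pos, and where it stops either pos = 0 or result[pos] ≤ r
theorem pvDown_le (result : List Int) (r : Int) (pos : Nat) : pvDown result r pos ≤ pos := by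
  induction pos with
  | zero => simp [pvDown]
  | succ p ih => simp only [pvDown]; split <;> omega

theorem pvDown_stop (result : List Int) (r : Int) (pos : Nat) :
    pvDown result r pos = 0 ∨ result.getD (pvDown result r pos) 0 ≤ r := by
  induction pos with
  | zero => left; simp [pvDown]
  | succ p ih =>
    simp only [pvDown]
    split
    · exact ih
    · right; omega

-- the upward scan: bounds and the two stopping facts
theorem pvUp_spec (result : List Int) (r : Int) (i : Nat) :
    ∀ (n pos : Nat), i - pos ≤ n → pos ≤ i →
    pos ≤ pvUp result r i pos ∧ pvUp result r i pos ≤ i ∧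
    (pvUp result r i pos = i ∨ r ≤ result.getD (pvUp result r i pos) 0) ∧
    (pvUp result r i pos = pos ∨ result.getD (pvUp result r i pos - 1) 0 < r) := by
  intro n
  induction n with
  | zero =>
    intro pos hn hp
    have : pos = i := by omega
    subst this
    rw [pvUp]
    simp
  | succ m ih =>
    intro pos hn hp
    rw [pvUp]
    split
    · rename_i hcond
      have h := ih (pos + 1) (by omega) (by omega)
      refine ⟨by omega, h.2.1, h.2.2.1, ?_⟩
      rcases h.2.2.2 with h1 | h1
      · right; rw [h1]; simpa using hcond.2
      · right; exact h1
    · rename_i hcond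
      rw [not_and_or, not_lt, not_lt] at hcond
      refine ⟨le_refl _, hp, ?_, Or.inl rfl⟩
      by_cases hpi : pos = i
      · exact Or.inl hpi
      · right
        rcases hcond with h1 | h1
        · omega
        · exact h1

-- inserting r at a position that is ≥ everything left of it and ≤ everything from it keeps sortedness
theorem insert_sorted (l : List Int) (r : Int) (p : Nat) (hp : p ≤ l.length)
    (hsort : l.Pairwise (· ≤ ·))
    (hlo : ∀ j (hj : j < l.length), j < p → l[j] ≤ r)
    (hhi : ∀ j (hj : j < l.length), p ≤ j → r ≤ l[j]) :
    (l.take p ++ r :: l.drop p).Pairwise (· ≤ ·) := by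
  rw [List.pairwise_append]
  refine ⟨hsort.sublist (List.take_sublist p l), ?_, ?_⟩
  · rw [List.pairwise_cons]
    refine ⟨?_, hsort.sublist (List.drop_sublist p l)⟩
    intro b hb
    obtain ⟨k, hk, rfl⟩ := List.mem_iff_getElem.mp hb
    rw [List.getElem_drop]
    exact hhi _ _ (by omega)
  · intro x hx b hb
    obtain ⟨j, hj, rfl⟩ := List.mem_iff_getElem.mp hx
    rw [List.getElem_take]
    have hjp : j < p := by simp at hj; omega
    have hxr : l[j] ≤ r := hlo j (by omega) hjp
    rcases List.mem_cons.mp hb with rfl | hb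
    · exact hxr
    · obtain ⟨k, hk, rfl⟩ := List.mem_iff_getElem.mp hb
      rw [List.getElem_drop]
      exact le_trans hxr (hhi _ _ (by omega))

-- main loop invariant: from a sorted result with pos in range (and i = result.length, as in A),
-- pvMain returns a sorted permutation of map f xs ++ result
theorem pvMain_spec (a b c : Int) (xs : List Int) :
    ∀ (result : List Int) (pos : Nat), result.Pairwise (· ≤ ·) → pos < result.length →
    (pvMain a b c xs result pos result.length).Pairwise (· ≤ ·) ∧
    (pvMain a b c xs result pos result.length).Perm
      (xs.map (fun x => a * x * x + b * x + c) ++ result) := by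
  induction xs with
  | nil => intro result pos hs _; simpa [pvMain] using hs
  | cons x xs ih =>
    intro result pos hs hpos
    simp only [pvMain]
    set r := a * x * x + b * x + c with hr
    set len := result.length with hlen
    set pos1 := pvDown result r pos with hpos1
    set pos2 := pvUp result r len pos1 with hpos2
    have hd := pvDown_le result r pos
    have hds := pvDown_stop result r pos
    rw [← hpos1] at hd hds
    have hu := pvUp_spec result r len (len - pos1) pos1 (le_refl _) (by omega)
    rw [← hpos2] at hu
    have hmono : ∀ j k (hj : j < len) (hk : k < len), j ≤ k → result[j] ≤ result[k] := by
      intro j k hj hk hjk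
      rcases Nat.lt_or_ge j k with h | h
      · exact (List.pairwise_iff_getElem.mp hs) j k hj hk h
      · have : j = k := by omega
        subst this; exact le_refl _
    have hlo : ∀ j (hj : j < len), j < pos2 → result[j] ≤ r := by
      intro j hj hjp
      rcases hu.2.2.2 with he | hlt
      · -- pos2 = pos1 : pvDown's stopping fact applies
        rw [he] at hjp
        rcases hds with h0 | hle
        · omega
        · rw [List.getD_eq_getElem result 0 (by omega)] at hle
          exact le_trans (hmono j pos1 hj (by omega) (by omega)) hle
      · have hp2 : pos2 - 1 < len := by omega
        rw [List.getD_eq_getElem result 0 hp2] at hlt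
        exact le_trans (hmono j (pos2 - 1) hj hp2 (by omega)) (le_of_lt hlt)
    have hhi : ∀ j (hj : j < len), pos2 ≤ j → r ≤ result[j] := by
      intro j hj hjp
      rcases hu.2.2.1 with he | hle
      · omega
      · rw [List.getD_eq_getElem result 0 (by omega)] at hle
        exact le_trans hle (hmono pos2 j (by omega) hj hjp)
    have hp2len : pos2 ≤ len := hu.2.1
    have hins : PySem.List.insert result (pos2 : Int) r = result.take pos2 ++ r :: result.drop pos2 :=
      PySem.List.insert_natCast result pos2 r (by omega)
    have hsort' : (PySem.List.insert result (pos2 : Int) r).Pairwise (· ≤ ·) := by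
      rw [hins]; exact insert_sorted result r pos2 (by omega) hs hlo hhi
    have hperm' : (PySem.List.insert result (pos2 : Int) r).Perm (r :: result) := by
      rw [hins]
      have h := List.perm_middle (a := r) (l₁ := result.take pos2) (l₂ := result.drop pos2)
      rwa [List.take_append_drop] at h
    have hlen' : (PySem.List.insert result (pos2 : Int) r).length = len + 1 := by
      rw [hins]; simp; omega
    have := ih (PySem.List.insert result (pos2 : Int) r) pos2 hsort' (by omega)
    rw [hlen'] at this
    refine ⟨this.1, ?_⟩
    have hstep := this.2.trans (List.Perm.append_left _ hperm')
    simp only [List.map_cons, List.cons_append]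
    exact hstep.trans List.perm_middle

-- ===== VERDICT (by name: the statement is the Claim_ definition above) =====
theorem sortTransformedArray_spec : Claim_equal_sortTransformedArray := by
  intro nums a b c _hdom hpre
  unfold Spec_sortTransformedArray
  match nums with
  | [] => exact absurd rfl hpre
  | x :: xs =>
    have hv : a * x ^ 2 + b * x + c = a * x * x + b * x + c := by ring
    have h := pvMain_spec a b c xs [a * x ^ 2 + b * x + c] 0 (by simp) (by simp)
    simp only [List.length_singleton] at h
    show pvMain a b c xs [a * x ^ 2 + b * x + c] 0 1 = _
    refine PySem.List.eq_of_perm_of_pairwise_le_of_injective (fun v => (v : Int))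
      (fun _ _ h => h) ?_ h.1 ?_
    · refine h.2.trans ?_
      have hsp := PySem.List.sorted_perm ((x :: xs).map (fun x => a * x * x + b * x + c)) (fun v => (v : Int)) false
      refine List.Perm.trans ?_ hsp.symm
      simp only [List.map_cons, hv]
      have h2 : ((x :: xs).map (fun x => a * x * x + b * x + c)).Perm
          (xs.map (fun x => a * x * x + b * x + c) ++ [a * x * x + b * x + c]) := by
        simpa using (List.perm_middle (a := a * x * x + b * x + c)
          (l₁ := xs.map fun x => a * x * x + b * x + c) (l₂ := ([] : List Int))).symm
      exact h2.symm
    · exact PySem.List.sorted_pairwise ((x :: xs).map (fun x => a * x * x + b * x + c)) (fun v => (v : Int))
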